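-- pv_equiv track=rewrite | github.com/clement-ghn/new-jdc | decouper_groupes.py | decouper_groupes
-- ===== SOURCE A (Python) =====
-- from math import ceil,floor
--
-- def decouper_groupes(groupes, nombre_sous_groupes_a, nombre_sous_groupes_b):
--     sous_groupes = [[] for _ in range(len(groupes))]
--     for i, groupe in enumerate(groupes):
--         hommes = [personne for personne in groupe if personne['sexe'] == 'Homme']
--         femmes = [personne for personne in groupe if personne['sexe'] == 'Femme']
--
--         taille_sous_groupe_a = ceil(len(hommes) / nombre_sous_groupes_a)
--         taille_sous_groupe_b = ceil(len(femmes) / nombre_sous_groupes_b)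
--
--
--
--
--         hommes_restants = hommes.copy()
--         femmes_restantes = femmes.copy()
--
--         if i == 0:
--             # Groupe A
--             for j in range(nombre_sous_groupes_a):
--                 nb_hommes = min(taille_sous_groupe_a, len(hommes_restants))
--                 nb_femmes = min(taille_sous_groupe_b, len(femmes_restantes))
--                 sous_groupe_h = hommes_restants[:nb_hommes]
--                 sous_groupe_f = femmes_restantes[:nb_femmes]
--                 sous_groupe = sous_groupe_h + sous_groupe_f
--                 sous_groupes[i].append(sous_groupe)
--                 hommes_restants = hommes_restants[nb_hommes:]
--                 femmes_restantes = femmes_restantes[nb_femmes:]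
--         else:
--             # Groupe B
--             for j in range(nombre_sous_groupes_b):
--                 nb_hommes = min(taille_sous_groupe_a, len(hommes_restants))
--                 nb_femmes = min(taille_sous_groupe_b, len(femmes_restantes))
--                 sous_groupe_h = hommes_restants[:nb_hommes]
--                 sous_groupe_f = femmes_restantes[:nb_femmes]
--                 sous_groupe = sous_groupe_h + sous_groupe_f
--                 sous_groupes[i].append(sous_groupe)
--                 hommes_restants = hommes_restants[nb_hommes:]
--                 femmes_restantes = femmes_restantes[nb_femmes:]
--
--     return sous_groupes
-- ===== SOURCE B (Python) =====
-- from math import ceil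
--
-- def decouper_groupes(groupes, nombre_sous_groupes_a, nombre_sous_groupes_b):
--     resultat = []
--     for i, groupe in enumerate(groupes):
--         hommes = [personne for personne in groupe if personne['sexe'] == 'Homme']
--         femmes = [personne for personne in groupe if personne['sexe'] == 'Femme']
--         sa = ceil(len(hommes) / nombre_sous_groupes_a)
--         sb = ceil(len(femmes) / nombre_sous_groupes_b)
--         n = nombre_sous_groupes_a if i == 0 else nombre_sous_groupes_b
--         resultat.append([hommes[j*sa:(j+1)*sa] + femmes[j*sb:(j+1)*sb]
--                          for j in range(n)])
--     return resultat
-- ===== Notes on version B (the rewrite author's own statement) =====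
-- stated objective: simpler
-- what changed: B replaces A's duplicated per-branch loops and consume-the-remainder state (copy, hommes_restants/femmes_restantes, min bookkeeping) by a single loop over groups that builds each sub-group by direct index slicing hommes[j*sa:(j+1)*sa] + femmes[j*sb:(j+1)*sb], relying on Python slice clamping.
import Mathlib
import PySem

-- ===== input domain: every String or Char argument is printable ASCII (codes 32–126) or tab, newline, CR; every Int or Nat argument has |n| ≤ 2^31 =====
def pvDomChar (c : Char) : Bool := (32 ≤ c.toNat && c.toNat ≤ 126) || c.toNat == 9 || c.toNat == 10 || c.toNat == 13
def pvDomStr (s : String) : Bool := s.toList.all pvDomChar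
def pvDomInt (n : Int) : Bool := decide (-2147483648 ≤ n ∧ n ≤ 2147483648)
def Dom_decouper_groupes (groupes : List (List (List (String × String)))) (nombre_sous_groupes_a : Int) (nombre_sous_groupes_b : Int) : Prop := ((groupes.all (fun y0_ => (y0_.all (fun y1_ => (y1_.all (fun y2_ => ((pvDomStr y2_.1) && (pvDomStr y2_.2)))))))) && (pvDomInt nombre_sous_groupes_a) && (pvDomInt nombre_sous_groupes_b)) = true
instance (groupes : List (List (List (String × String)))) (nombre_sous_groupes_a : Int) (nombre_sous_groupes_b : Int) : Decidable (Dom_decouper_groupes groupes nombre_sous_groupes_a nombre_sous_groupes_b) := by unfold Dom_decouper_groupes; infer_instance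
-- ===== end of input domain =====

-- B replaces A's duplicated branches and consume-the-remainder accumulator by one loop with
-- direct index slicing (objective: simpler). math.ceil(len/n) is ported as -((-len) // n),
-- exact here since the numerator is a list length and |n| ≤ 2^31.

-- ===== PORT A =====
def decouper_groupes (groupes : List (List (List (String × String)))) (nombre_sous_groupes_a : Int) (nombre_sous_groupes_b : Int) : List (List (List (List (String × String)))) :=
  (PySem.List.enumerate groupes).foldl (fun sous_groupes ig =>
    let i := ig.1
    let groupe := ig.2
    let hommes := groupe.filter (fun personne => PySem.Dict.getD ⟨personne⟩ "sexe" "" == "Homme")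
    let femmes := groupe.filter (fun personne => PySem.Dict.getD ⟨personne⟩ "sexe" "" == "Femme")
    let taille_sous_groupe_a : Int := -(PySem.Int.floordiv (-(hommes.length : Int)) nombre_sous_groupes_a)
    let taille_sous_groupe_b : Int := -(PySem.Int.floordiv (-(femmes.length : Int)) nombre_sous_groupes_b)
    if i = 0 then
      -- Groupe A
      let st := (PySem.List.pyRange 0 nombre_sous_groupes_a 1).foldl
        (fun (st : List (List (List (String × String))) × List (List (String × String)) × List (List (String × String))) _ =>
          let nb_hommes := min taille_sous_groupe_a (st.2.1.length : Int)
          let nb_femmes := min taille_sous_groupe_b (st.2.2.length : Int)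
          (st.1 ++ [PySem.List.slice st.2.1 none (some nb_hommes) ++ PySem.List.slice st.2.2 none (some nb_femmes)],
           PySem.List.slice st.2.1 (some nb_hommes) none,
           PySem.List.slice st.2.2 (some nb_femmes) none))
        ([], hommes, femmes)
      sous_groupes ++ [st.1]
    else
      -- Groupe B
      let st := (PySem.List.pyRange 0 nombre_sous_groupes_b 1).foldl
        (fun (st : List (List (List (String × String))) × List (List (String × String)) × List (List (String × String))) _ =>
          let nb_hommes := min taille_sous_groupe_a (st.2.1.length : Int)
          let nb_femmes := min taille_sous_groupe_b (st.2.2.length : Int)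
          (st.1 ++ [PySem.List.slice st.2.1 none (some nb_hommes) ++ PySem.List.slice st.2.2 none (some nb_femmes)],
           PySem.List.slice st.2.1 (some nb_hommes) none,
           PySem.List.slice st.2.2 (some nb_femmes) none))
        ([], hommes, femmes)
      sous_groupes ++ [st.1]) []

-- ===== PORT B =====
def decouper_groupes_alt (groupes : List (List (List (String × String)))) (nombre_sous_groupes_a : Int) (nombre_sous_groupes_b : Int) : List (List (List (List (String × String)))) :=
  (PySem.List.enumerate groupes).map (fun ig =>
    let groupe := ig.2
    let hommes := groupe.filter (fun personne => PySem.Dict.getD ⟨personne⟩ "sexe" "" == "Homme")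
    let femmes := groupe.filter (fun personne => PySem.Dict.getD ⟨personne⟩ "sexe" "" == "Femme")
    let sa : Int := -(PySem.Int.floordiv (-(hommes.length : Int)) nombre_sous_groupes_a)
    let sb : Int := -(PySem.Int.floordiv (-(femmes.length : Int)) nombre_sous_groupes_b)
    let n : Int := if ig.1 = 0 then nombre_sous_groupes_a else nombre_sous_groupes_b
    (PySem.List.pyRange 0 n 1).map (fun j =>
      PySem.List.slice hommes (some (j * sa)) (some ((j + 1) * sa)) ++
      PySem.List.slice femmes (some (j * sb)) (some ((j + 1) * sb))))

-- ===== PRECONDITION & SPEC =====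
-- Pre_ excludes exactly the inputs where Python A raises: a person without the key 'sexe'
-- (KeyError), and a zero sub-group count with at least one group (ZeroDivisionError in ceil).
def Pre_decouper_groupes (groupes : List (List (List (String × String)))) (nombre_sous_groupes_a : Int) (nombre_sous_groupes_b : Int) : Prop :=
  (∀ groupe ∈ groupes, ∀ personne ∈ groupe, (PySem.Dict.get? (⟨personne⟩ : PySem.Dict String String) "sexe").isSome) ∧
  (groupes = [] ∨ (nombre_sous_groupes_a ≠ 0 ∧ nombre_sous_groupes_b ≠ 0))
instance (groupes : List (List (List (String × String)))) (nombre_sous_groupes_a : Int) (nombre_sous_groupes_b : Int) : Decidable (Pre_decouper_groupes groupes nombre_sous_groupes_a nombre_sous_groupes_b) := by unfold Pre_decouper_groupes; infer_instance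

def pvWitness_decouper_groupes : (List (List (List (String × String)))) × Int × Int :=
  ([[[("sexe", "Homme")], [("sexe", "Femme")], [("sexe", "Homme")]], [[("sexe", "Femme")]]], 2, 3)

def Spec_decouper_groupes (groupes : List (List (List (String × String)))) (nombre_sous_groupes_a : Int) (nombre_sous_groupes_b : Int) (out : List (List (List (List (String × String))))) : Prop := out = decouper_groupes_alt groupes nombre_sous_groupes_a nombre_sous_groupes_b
instance (groupes : List (List (List (String × String)))) (nombre_sous_groupes_a : Int) (nombre_sous_groupes_b : Int) (out : List (List (List (List (String × String))))) : Decidable (Spec_decouper_groupes groupes nombre_sous_groupes_a nombre_sous_groupes_b out) := by unfold Spec_decouper_groupes; infer_instance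

-- ===== CLAIM (what is proved, stated in full; the proofs are below) =====
def Claim_equal_decouper_groupes : Prop := ∀ (groupes : List (List (List (String × String)))) (nombre_sous_groupes_a : Int) (nombre_sous_groupes_b : Int), Dom_decouper_groupes groupes nombre_sous_groupes_a nombre_sous_groupes_b → Pre_decouper_groupes groupes nombre_sous_groupes_a nombre_sous_groupes_b → Spec_decouper_groupes groupes nombre_sous_groupes_a nombre_sous_groupes_b (decouper_groupes groupes nombre_sous_groupes_a nombre_sous_groupes_b)

-- ===== LEMMAS AND PROOFS =====

lemma le_or_lt_custom (t : Int) : 0 ≤ t ∨ t < 0 := by omega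

-- dropping past the end drops everything: drop counts with the same clamp give the same list
lemma pvDrop_congr {α : Type} (l : List α) (m n : Nat) (h : min m l.length = min n l.length) :
    l.drop m = l.drop n := by
  apply List.ext_getElem
  · simp only [List.length_drop]; omega
  · intro k hk1 hk2
    simp only [List.getElem_drop]
    congr 1
    simp only [List.length_drop] at hk1 hk2
    omega

-- A's remainder state after j iterations of its inner loop, for one sex with chunk size t.
def pvRest {α : Type} (l : List α) (t : Int) : Nat → List α
  | 0 => l
  | j + 1 =>
    PySem.List.slice (pvRest l t j) (some (min t ((pvRest l t j).length : Int))) none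

-- closed form of the remainder
lemma pvRest_closed {α : Type} (l : List α) (t : Int) (j : Nat) :
    pvRest l t j =
      if 0 ≤ t then l.drop (j * t.toNat)
      else if j = 0 then l else l.drop (l.length - (-t).toNat) := by
  induction j with
  | zero => simp [pvRest]
  | succ j ih =>
    rw [pvRest, ih]
    have hmul : (j + 1) * t.toNat = j * t.toNat + t.toNat := by ring
    rcases le_or_lt_custom t with ht | ht
    · simp only [if_pos ht]
      have hd : (l.drop (j * t.toNat)).length = l.length - j * t.toNat := List.length_drop
      have hT : (t.toNat : Int) = t := Int.toNat_of_nonneg ht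
      have h1 : min t ((l.drop (j * t.toNat)).length : Int)
          = ((min t.toNat (l.length - j * t.toNat) : Nat) : Int) := by
        rw [hd]; omega
      rw [h1, PySem.List.slice_from_natCast, List.drop_drop]
      apply pvDrop_congr
      omega
    · have hk : 0 < (-t).toNat := by omega
      simp only [if_neg (show ¬ 0 ≤ t by omega), if_neg (Nat.succ_ne_zero j)]
      rcases Nat.eq_zero_or_pos j with hj | hj
      · subst hj
        simp only [reduceIte]
        have h1 : min t (l.length : Int) = -(((-t).toNat : Nat) : Int) := by
          rw [min_eq_left (by omega)]; omega
        rw [h1, PySem.List.slice_from_neg_natCast _ _ hk]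
      · simp only [if_neg (show ¬ j = 0 by omega)]
        have hlen : (l.drop (l.length - (-t).toNat)).length = min (-t).toNat l.length := by
          rw [List.length_drop]; omega
        have h1 : min t ((l.drop (l.length - (-t).toNat)).length : Int)
            = -(((-t).toNat : Nat) : Int) := by
          rw [min_eq_left (by rw [hlen]; omega)]; omega
        rw [h1, PySem.List.slice_from_neg_natCast _ _ hk, hlen, List.drop_drop]
        apply pvDrop_congr
        omega

-- the chunk A cuts at step j equals B's direct slice
lemma pvChunk_eq {α : Type} (l : List α) (t : Int) (j : Nat) :
    PySem.List.slice (pvRest l t j) none (some (min t ((pvRest l t j).length : Int)))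
      = PySem.List.slice l (some ((j : Int) * t)) (some (((j : Int) + 1) * t)) := by
  rw [pvRest_closed]
  have hmulN : (j + 1) * t.toNat = j * t.toNat + t.toNat := by ring
  rcases le_or_lt_custom t with ht | ht
  · rw [if_pos ht]
    have hd : (l.drop (j * t.toNat)).length = l.length - j * t.toNat := List.length_drop
    have hT : (t.toNat : Int) = t := Int.toNat_of_nonneg ht
    have h1 : min t ((l.drop (j * t.toNat)).length : Int)
        = ((min t.toNat (l.length - j * t.toNat) : Nat) : Int) := by
      rw [hd]; omega
    have h2 : (j : Int) * t = ((j * t.toNat : Nat) : Int) := by push_cast [hT]; ring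
    have h3 : ((j : Int) + 1) * t = (((j + 1) * t.toNat : Nat) : Int) := by push_cast [hT]; ring
    rw [h1, PySem.List.slice_to_natCast, h2, h3, PySem.List.slice_natCast, List.take_drop]
    apply List.ext_getElem
    · simp only [List.length_take, List.length_drop]
      omega
    · intro k hk1 hk2
      simp only [List.getElem_take, List.getElem_drop]
  · have hk : 0 < (-t).toNat := by omega
    have hT : ((-t).toNat : Int) = -t := Int.toNat_of_nonneg (by omega)
    rcases Nat.eq_zero_or_pos j with hj | hj
    · subst hj
      rw [if_neg (show ¬ 0 ≤ t by omega), if_pos rfl]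
      simp only [Nat.cast_zero, zero_mul, zero_add, one_mul, PySem.List.slice_zero_start]
      have h1 : min t (l.length : Int) = t := min_eq_left (by omega)
      rw [h1]
    · rw [if_neg (show ¬ 0 ≤ t by omega), if_neg (show ¬ j = 0 by omega)]
      have hlen : (l.drop (l.length - (-t).toNat)).length = min (-t).toNat l.length := by
        rw [List.length_drop]; omega
      have h1 : min t ((l.drop (l.length - (-t).toNat)).length : Int)
          = -(((-t).toNat : Nat) : Int) := by
        rw [min_eq_left (by rw [hlen]; omega)]; omega
      rw [h1, PySem.List.slice_to_neg_natCast _ _ hk]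
      have h2 : (l.drop (l.length - (-t).toNat)).length - (-t).toNat = 0 := by
        rw [hlen]; omega
      rw [h2, List.take_zero]
      -- RHS is also empty: the clamped stop is ≤ the clamped start
      have hjt : (j : Int) * t = -(((j * (-t).toNat : Nat) : Nat) : Int) := by
        push_cast [hT]; ring
      have hjt1 : ((j : Int) + 1) * t = -((((j + 1) * (-t).toNat : Nat) : Nat) : Int) := by
        push_cast [hT]; ring
      have hk1 : 0 < j * (-t).toNat := by positivity
      have hk2 : 0 < (j + 1) * (-t).toNat := by positivity
      rw [hjt, hjt1]
      simp only [PySem.List.slice, PySem.List.clampIdx_neg_natCast _ _ hk1,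
        PySem.List.clampIdx_neg_natCast _ _ hk2]
      have hmul2 : (j + 1) * (-t).toNat = j * (-t).toNat + (-t).toNat := by ring
      have h3 : l.length - (j + 1) * (-t).toNat - (l.length - j * (-t).toNat) = 0 := by omega
      rw [h3, List.take_zero]

-- the inner loop of A, run (length of L) more times from state j, yields B's slices j, j+1, …
lemma pvInner_eq {α : Type} (h f : List α) (ta tb : Int) (L : List Int) :
    ∀ (j : Nat) (acc : List (List α)),
    (L.foldl (fun (st : List (List α) × List α × List α) _ =>
        let nh := min ta (st.2.1.length : Int)
        let nf := min tb (st.2.2.length : Int)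
        (st.1 ++ [PySem.List.slice st.2.1 none (some nh) ++ PySem.List.slice st.2.2 none (some nf)],
         PySem.List.slice st.2.1 (some nh) none,
         PySem.List.slice st.2.2 (some nf) none))
      (acc, pvRest h ta j, pvRest f tb j)).1
    = acc ++ (List.range' j L.length).map (fun (m : Nat) =>
        PySem.List.slice h (some ((m : Int) * ta)) (some (((m : Int) + 1) * ta)) ++
        PySem.List.slice f (some ((m : Int) * tb)) (some (((m : Int) + 1) * tb))) := by
  induction L with
  | nil => intro j acc; simp
  | cons x L ih =>
    intro j acc
    simp only [List.foldl_cons]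
    have hstep :
        (acc ++ [PySem.List.slice (pvRest h ta j) none (some (min ta ((pvRest h ta j).length : Int))) ++
                 PySem.List.slice (pvRest f tb j) none (some (min tb ((pvRest f tb j).length : Int)))],
         PySem.List.slice (pvRest h ta j) (some (min ta ((pvRest h ta j).length : Int))) none,
         PySem.List.slice (pvRest f tb j) (some (min tb ((pvRest f tb j).length : Int))) none)
        = (acc ++ [PySem.List.slice h (some ((j : Int) * ta)) (some (((j : Int) + 1) * ta)) ++
                   PySem.List.slice f (some ((j : Int) * tb)) (some (((j : Int) + 1) * tb))],
           pvRest h ta (j + 1), pvRest f tb (j + 1)) := by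
      rw [pvChunk_eq, pvChunk_eq]
      rfl
    rw [hstep, ih (j + 1)]
    rw [List.length_cons, List.range'_succ, List.map_cons, List.append_assoc, List.singleton_append]

-- one group of A equals one group of B
lemma pvGroup_eq {α : Type} (h f : List α) (ta tb : Int) (n : Int) :
    ((PySem.List.pyRange 0 n 1).foldl (fun (st : List (List α) × List α × List α) _ =>
        let nh := min ta (st.2.1.length : Int)
        let nf := min tb (st.2.2.length : Int)
        (st.1 ++ [PySem.List.slice st.2.1 none (some nh) ++ PySem.List.slice st.2.2 none (some nf)],
         PySem.List.slice st.2.1 (some nh) none,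
         PySem.List.slice st.2.2 (some nf) none))
      ([], h, f)).1
    = (PySem.List.pyRange 0 n 1).map (fun j =>
        PySem.List.slice h (some (j * ta)) (some ((j + 1) * ta)) ++
        PySem.List.slice f (some (j * tb)) (some ((j + 1) * tb))) := by
  have h0 : (([] : List (List α)), h, f) = ([], pvRest h ta 0, pvRest f tb 0) := rfl
  rw [h0, pvInner_eq]
  rw [PySem.List.pyRange_one 0 n, List.length_map, List.length_range, List.map_map,
    List.range_eq_range']
  simp only [List.nil_append]
  apply List.map_congr_left
  intro m _
  simp [Function.comp]

-- the two ports agree on every input (the Lean-level functions are total)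
lemma pvMain_eq (groupes : List (List (List (String × String)))) (a b : Int) :
    decouper_groupes groupes a b = decouper_groupes_alt groupes a b := by
  unfold decouper_groupes decouper_groupes_alt
  induction groupes using List.reverseRecOn with
  | nil => rfl
  | append_singleton gs g ih =>
    rw [PySem.List.enumerate_append, List.foldl_append, List.map_append, ← ih]
    simp only [PySem.List.enumerate_cons, PySem.List.enumerate_nil, List.foldl_cons,
      List.foldl_nil, List.map_cons, List.map_nil]
    rw [pvGroup_eq, pvGroup_eq]
    split <;> rfl

-- ===== VERDICT (by name: the statement is the Claim_ definition above) =====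
theorem decouper_groupes_spec : Claim_equal_decouper_groupes := by
  intro groupes a b _ _
  unfold Spec_decouper_groupes
  exact pvMain_eq groupes a b
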